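-- pv_equiv track=rewrite | github.com/umutpo/advent-of-code-2024 | day1/day1.py | partTwo
-- ===== SOURCE A (Python) =====
-- def partTwo(left: list[int], right: list[int]) -> int:
--     rightFreqs = {}
--     for el in right:
--         if rightFreqs.get(el) == None:
--             rightFreqs[el] = 1
--         else:
--             rightFreqs[el] += 1
--
--     total = 0
--     for el in left:
--         frequency = 0 if rightFreqs.get(el) == None else rightFreqs[el]
--         total += el * frequency
--
--     return total
-- ===== SOURCE B (Python) =====
-- def partTwo(left: list[int], right: list[int]) -> int:
--     ls = sorted(left)
--     rs = sorted(right)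
--     total = 0
--     i = j = 0
--     while i < len(ls) and j < len(rs):
--         if ls[i] < rs[j]:
--             i += 1
--         elif rs[j] < ls[i]:
--             j += 1
--         else:
--             v = ls[i]
--             ci = 0
--             while i + ci < len(ls) and ls[i + ci] == v:
--                 ci += 1
--             cj = 0
--             while j + cj < len(rs) and rs[j + cj] == v:
--                 cj += 1
--             total += v * ci * cj
--             i += ci
--             j += cj
--     return total
-- ===== Notes on version B (the rewrite author's own statement) =====
-- stated objective: alternative
-- what changed: B replaces A's hash-table frequency pass and per-element lookups by sort-then-merge: it sorts both lists and scans them once in parallel with two pointers, multiplying run lengths of equal values; no frequency table is maintained.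
import Mathlib
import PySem

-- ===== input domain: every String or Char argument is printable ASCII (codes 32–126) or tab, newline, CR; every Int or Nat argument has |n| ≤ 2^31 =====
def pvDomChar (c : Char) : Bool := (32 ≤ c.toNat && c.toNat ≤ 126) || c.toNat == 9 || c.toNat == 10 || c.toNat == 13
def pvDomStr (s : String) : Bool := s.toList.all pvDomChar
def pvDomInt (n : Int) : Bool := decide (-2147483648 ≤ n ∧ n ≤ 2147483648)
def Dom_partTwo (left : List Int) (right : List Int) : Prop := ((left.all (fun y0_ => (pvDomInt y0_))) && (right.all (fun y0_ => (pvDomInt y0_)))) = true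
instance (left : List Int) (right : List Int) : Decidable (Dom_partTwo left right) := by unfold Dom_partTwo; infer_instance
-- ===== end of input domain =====

-- B replaces A's hash-table frequency pass by sort-then-merge: both lists are sorted and
-- scanned once in parallel, multiplying run lengths of equal values (objective: alternative).

-- ===== PORT A =====
-- freq-building loop of A: insert 1 on first sight, else d[el] += 1
def partTwoFreqs (right : List Int) : PySem.Dict Int Int :=
  right.foldl (fun d el =>
    if d.get? el == none then d.insert el 1 else d.insert el (d.getD el 0 + 1))
    PySem.Dict.empty

def partTwo (left : List Int) (right : List Int) : Int :=
  let rightFreqs := partTwoFreqs right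
  left.foldl (fun total el =>
    total + el * (if rightFreqs.get? el == none then 0 else rightFreqs.getD el 0)) 0

-- ===== PORT B =====
-- run length at the head: the inner 'while … == v: c += 1' loops of Source B
def runLen (v : Int) : List Int → Nat
  | [] => 0
  | x :: xs => if x = v then runLen v xs + 1 else 0

-- needed by mergeScore's termination proof
lemma runLen_head_pos (v : Int) (xs : List Int) : 1 ≤ runLen v (v :: xs) := by
  simp [runLen]

-- the outer two-pointer while loop of Source B, pointers rendered as the suffixes they denote
def mergeScore : List Int → List Int → Int
  | [], _ => 0
  | _ :: _, [] => 0
  | x :: xs, y :: ys =>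
    if x < y then mergeScore xs (y :: ys)
    else if y < x then mergeScore (x :: xs) ys
    else
      let ci := runLen x (x :: xs)
      let cj := runLen x (y :: ys)
      x * ci * cj + mergeScore ((x :: xs).drop ci) ((y :: ys).drop cj)
termination_by a b => a.length + b.length
decreasing_by
  · simp
  · simp
  · have h1 := runLen_head_pos x xs
    simp only [List.length_drop, List.length_cons]
    omega

def partTwo_alt (left : List Int) (right : List Int) : Int :=
  mergeScore (PySem.List.sorted left (fun x => x) false)
             (PySem.List.sorted right (fun x => x) false)

-- ===== PRECONDITION & SPEC =====
def Spec_partTwo (left : List Int) (right : List Int) (out : Int) : Prop := out = partTwo_alt left right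
instance (left : List Int) (right : List Int) (out : Int) : Decidable (Spec_partTwo left right out) := by unfold Spec_partTwo; infer_instance

-- ===== CLAIM (what is proved, stated in full; the proofs are below) =====
def Claim_equal_partTwo : Prop := ∀ (left : List Int) (right : List Int), Dom_partTwo left right → Spec_partTwo left right (partTwo left right)

-- ===== LEMMAS AND PROOFS =====

-- the common value both programs compute: sum over left of el * count in right
def wsum (a b : List Int) : Int := (a.map (fun x => x * (b.count x : Int))).sum

-- ---- A-side: A computes wsum ----
lemma partTwoFreqs_eq_counter (right : List Int) :
    partTwoFreqs right = PySem.Dict.counter right := by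
  unfold partTwoFreqs
  rw [← PySem.Dict.foldl_insert_getD_add_one_eq_counter]
  congr 1
  funext d el
  by_cases h : d.get? el = none
  · simp [h, PySem.Dict.getD_eq_get?_getD]
  · simp [h]

lemma partTwo_getD (right : List Int) (v : Int) :
    (partTwoFreqs right).getD v 0 = (right.count v : Int) := by
  rw [partTwoFreqs_eq_counter, PySem.Dict.getD_counter]

lemma partTwo_foldl (left right : List Int) (a : Int) :
    left.foldl (fun total el =>
      total + el * (if (partTwoFreqs right).get? el == none then 0
                    else (partTwoFreqs right).getD el 0)) a
      = a + wsum left right := by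
  induction left generalizing a with
  | nil => simp [wsum]
  | cons x xs ih =>
    simp only [List.foldl_cons]
    rw [ih]
    have hx : (if (partTwoFreqs right).get? x == none then (0:Int)
               else (partTwoFreqs right).getD x 0) = (right.count x : Int) := by
      by_cases h : (partTwoFreqs right).get? x = none
      · simp [← partTwo_getD right x, PySem.Dict.getD_eq_get?_getD, h]
      · simp [h, partTwo_getD]
    rw [hx]; simp only [wsum, List.map_cons, List.sum_cons]; ring

-- ---- B-side: runLen facts on a sorted list ----
lemma run_decomp (v : Int) (l : List Int) :
    l = List.replicate (runLen v l) v ++ l.drop (runLen v l) := by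
  induction l with
  | nil => simp [runLen]
  | cons x xs ih =>
    by_cases h : x = v
    · subst h
      simp only [runLen, if_pos rfl, List.replicate_succ, List.cons_append,
        List.drop_succ_cons]
      exact congrArg (x :: ·) ih
    · simp [runLen, h]

lemma count_eq_runLen (v : Int) (l : List Int) (hp : l.Pairwise (· ≤ ·))
    (hv : ∀ z ∈ l, v ≤ z) : l.count v = runLen v l := by
  induction l with
  | nil => simp [runLen]
  | cons x xs ih =>
    rcases List.pairwise_cons.mp hp with ⟨hx, hp'⟩
    by_cases h : x = v
    · subst h
      have hrec := ih hp' (fun z hz => le_trans (hv _ List.mem_cons_self) (hx z hz))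
      simp [runLen, List.count_cons, hrec]
    · have hvx : v < x := lt_of_le_of_ne (hv x List.mem_cons_self) (Ne.symm h)
      have hcount : List.count v (x :: xs) = 0 := by
        rw [List.count_eq_zero]
        intro hm
        rcases List.mem_cons.mp hm with h' | hm'
        · exact h h'.symm
        · exact absurd (hx v hm') (by omega)
      simp [runLen, h, hcount]

lemma drop_run_gt (v : Int) (l : List Int) (hp : l.Pairwise (· ≤ ·))
    (hv : ∀ z ∈ l, v ≤ z) : ∀ z ∈ l.drop (runLen v l), v < z := by
  induction l with
  | nil => simp [runLen]
  | cons x xs ih =>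
    rcases List.pairwise_cons.mp hp with ⟨hx, hp'⟩
    by_cases h : x = v
    · subst h
      simp only [runLen, if_pos rfl, List.drop_succ_cons]
      exact ih hp' (fun z hz => le_trans (hv _ List.mem_cons_self) (hx z hz))
    · have hvx : v < x := lt_of_le_of_ne (hv x List.mem_cons_self) (Ne.symm h)
      simp only [runLen, if_neg h, List.drop_zero]
      intro z hz
      rcases List.mem_cons.mp hz with h' | hm'
      · omega
      · have := hx z hm'; omega

lemma wsum_nil_right (a : List Int) : wsum a [] = 0 := by
  simp [wsum]

lemma wsum_append (l1 l2 b : List Int) :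
    wsum (l1 ++ l2) b = wsum l1 b + wsum l2 b := by
  simp [wsum]

lemma merge_eq_aux (n : Nat) : ∀ (a b : List Int), a.length + b.length ≤ n →
    a.Pairwise (· ≤ ·) → b.Pairwise (· ≤ ·) → mergeScore a b = wsum a b := by
  induction n with
  | zero =>
    intro a b hlen _ _
    have ha : a = [] := by cases a <;> simp_all
    subst ha; simp [mergeScore, wsum]
  | succ n ih =>
    intro a b hlen ha hb
    match a, b with
    | [], b => simp [mergeScore, wsum]
    | x :: xs, [] => simp [mergeScore, wsum_nil_right]
    | x :: xs, y :: ys =>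
      rcases List.pairwise_cons.mp ha with ⟨hxa, ha'⟩
      rcases List.pairwise_cons.mp hb with ⟨hyb, hb'⟩
      rw [mergeScore]
      by_cases hxy : x < y
      · rw [if_pos hxy, ih xs (y :: ys) (by simp_all; omega) ha' hb]
        have hc : List.count x (y :: ys) = 0 := by
          rw [List.count_eq_zero]
          intro hm
          rcases List.mem_cons.mp hm with h' | hm'
          · omega
          · have := hyb x hm'; omega
        simp [wsum, hc]
      · by_cases hyx : y < x
        · rw [if_neg hxy, if_pos hyx, ih (x :: xs) ys (by simp_all; omega) ha hb']
          unfold wsum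
          apply congrArg List.sum
          apply List.map_congr_left
          intro z hz
          have hxz : x ≤ z := by
            rcases List.mem_cons.mp hz with h' | hm
            · omega
            · exact hxa z hm
          simp only [List.count_cons]
          have hzy : ¬ y = z := by omega
          simp [hzy]
        · have hxy' : x = y := le_antisymm (not_lt.mp hyx) (not_lt.mp hxy)
          subst hxy'
          rw [if_neg hxy, if_neg hyx]
          have hvx_a : ∀ z ∈ x :: xs, x ≤ z := by
            intro z hz
            rcases List.mem_cons.mp hz with h' | hm
            · omega
            · exact hxa z hm
          have hvx_b : ∀ z ∈ x :: ys, x ≤ z := by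
            intro z hz
            rcases List.mem_cons.mp hz with h' | hm
            · omega
            · exact hyb z hm
          have hca : (x :: xs).count x = runLen x (x :: xs) := count_eq_runLen x _ ha hvx_a
          have hcb : (x :: ys).count x = runLen x (x :: ys) := count_eq_runLen x _ hb hvx_b
          have hgt_a := drop_run_gt x (x :: xs) ha hvx_a
          have hgt_b := drop_run_gt x (x :: ys) hb hvx_b
          have hpa : ((x :: xs).drop (runLen x (x :: xs))).Pairwise (· ≤ ·) :=
            List.Pairwise.sublist (List.drop_sublist _ _) ha
          have hpb : ((x :: ys).drop (runLen x (x :: ys))).Pairwise (· ≤ ·) :=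
            List.Pairwise.sublist (List.drop_sublist _ _) hb
          have hlb : ((x :: xs).drop (runLen x (x :: xs))).length +
              ((x :: ys).drop (runLen x (x :: ys))).length ≤ n := by
            have h1 := runLen_head_pos x xs
            have h2 := runLen_head_pos x ys
            simp only [List.length_drop, List.length_cons] at *
            omega
          dsimp only
          rw [ih _ _ hlb hpa hpb]
          conv_rhs => rw [run_decomp x (x :: xs), wsum_append]
          have h1 : wsum (List.replicate (runLen x (x :: xs)) x) (x :: ys)
              = x * (runLen x (x :: xs) : Int) * (runLen x (x :: ys) : Int) := by
            simp [wsum, List.map_replicate, List.sum_replicate, nsmul_eq_mul, hcb]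
            ring
          have h2 : wsum ((x :: xs).drop (runLen x (x :: xs))) (x :: ys)
              = wsum ((x :: xs).drop (runLen x (x :: xs)))
                     ((x :: ys).drop (runLen x (x :: ys))) := by
            unfold wsum
            apply congrArg List.sum
            apply List.map_congr_left
            intro z hz
            have hxz : x < z := hgt_a z hz
            conv_lhs => rw [run_decomp x (x :: ys)]
            rw [List.count_append, List.count_replicate]
            have hzx : z ≠ x := by omega
            simp
            exact Or.inl (fun h => absurd h.symm hzx)
          rw [h1, h2]

lemma wsum_perm (a a' b b' : List Int) (ha : a.Perm a') (hb : b.Perm b') :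
    wsum a b = wsum a' b' := by
  unfold wsum
  have h1 : ∀ x ∈ a, x * (b.count x : Int) = x * (b'.count x : Int) := by
    intro x _; rw [hb.count_eq]
  rw [List.map_congr_left h1]
  exact (ha.map _).sum_eq

-- ===== VERDICT (by name: the statement is the Claim_ definition above) =====
theorem partTwo_spec : Claim_equal_partTwo := by
  intro left right _
  unfold Spec_partTwo partTwo partTwo_alt
  rw [partTwo_foldl, zero_add]
  rw [merge_eq_aux ((PySem.List.sorted left (fun x => x) false).length +
        (PySem.List.sorted right (fun x => x) false).length) _ _ le_rfl
        (by simpa using PySem.List.sorted_pairwise (xs := left) (key := fun x => x))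
        (by simpa using PySem.List.sorted_pairwise (xs := right) (key := fun x => x))]
  exact (wsum_perm _ _ _ _ (PySem.List.sorted_perm ..) (PySem.List.sorted_perm ..)).symm
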